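-- pv_equiv track=rewrite | github.com/MarioTeachesTyping/applied-ai-system-project | eval/evaluate.py | _parse_test_counts
-- ===== SOURCE A (Python) =====
-- def _parse_test_counts(test_output: str) -> tuple[int, int]:
--     """Return (passed, failed) counts extracted from pytest stdout."""
--     passed = failed = 0
--     for line in test_output.splitlines():
--         parts = line.split()
--         for i, part in enumerate(parts):
--             if part == "passed" and i > 0:
--                 try:
--                     passed = int(parts[i - 1])
--                 except ValueError:
--                     pass
--             if part == "failed" and i > 0:
--                 try:
--                     failed = int(parts[i - 1])
--                 except ValueError:
--                     pass
--     return passed, failed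
-- ===== SOURCE B (Python) =====
-- def _find_count(rev_lines, word):
--     """Last-successful-parse count = first successful parse scanning backwards."""
--     for line in rev_lines:
--         parts = line.split()
--         for i in range(len(parts) - 1, 0, -1):
--             if parts[i] == word:
--                 try:
--                     return int(parts[i - 1])
--                 except ValueError:
--                     continue
--     return 0
--
--
-- def _parse_test_counts(test_output: str) -> tuple[int, int]:
--     """Return (passed, failed) counts extracted from pytest stdout."""
--     rev_lines = test_output.splitlines()[::-1]
--     return _find_count(rev_lines, "passed"), _find_count(rev_lines, "failed")
-- ===== Notes on version B (the rewrite author's own statement) =====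
-- stated objective: alternative
-- what changed: Instead of A's forward sweep over every token of every line updating last-wins counters, B scans the lines (and each line's tokens) back to front and returns the first token that parses as an int before a standalone 'passed'/'failed', stopping early.
import Mathlib
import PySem

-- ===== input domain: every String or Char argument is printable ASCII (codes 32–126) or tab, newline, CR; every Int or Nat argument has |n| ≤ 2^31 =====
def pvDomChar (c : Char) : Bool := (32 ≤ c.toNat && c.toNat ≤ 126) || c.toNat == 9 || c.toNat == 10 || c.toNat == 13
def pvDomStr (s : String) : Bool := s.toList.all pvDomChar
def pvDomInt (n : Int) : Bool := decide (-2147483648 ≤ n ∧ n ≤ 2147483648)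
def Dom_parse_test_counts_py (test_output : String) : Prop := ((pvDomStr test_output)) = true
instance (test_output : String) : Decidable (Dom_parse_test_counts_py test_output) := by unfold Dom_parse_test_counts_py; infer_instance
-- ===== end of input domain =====

-- B re-implements the extraction as a backward scan with early exit: the last successful
-- int-parse before 'passed'/'failed' is the first one found scanning lines and tokens in reverse.
-- ===== PORT A =====
def parse_test_counts_py (test_output : String) : Int × Int :=
  (PySem.Str.splitlines test_output).foldl (fun pf line =>
    let parts := PySem.Str.split₀ line
    (PySem.List.enumerate parts).foldl (fun pf (ip : Int × String) =>
      let pf :=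
        if ip.2 = "passed" ∧ 0 < ip.1 then
          match PySem.List.pyGet? parts (ip.1 - 1) with  -- always in range here (0 < i < len)
          | some prev =>
            match PySem.Int.ofStr? prev with
            | some v => (v, pf.2)
            | none => pf
          | none => pf
        else pf
      if ip.2 = "failed" ∧ 0 < ip.1 then
        match PySem.List.pyGet? parts (ip.1 - 1) with
        | some prev =>
          match PySem.Int.ofStr? prev with
          | some v => (pf.1, v)
          | none => pf
        | none => pf
      else pf) pf) (0, 0)

-- ===== PORT B =====
-- inner loop of _find_count: for i in range(len(parts)-1, 0, -1), early return on a parse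
def pvScanLine (parts : List String) (word : String) : Nat → Option Int
  | 0 => none
  | i + 1 =>
    if PySem.List.pyGet? parts ((i : Int) + 1) = some word then
      match PySem.List.pyGet? parts (i : Int) with
      | some prev =>
        match PySem.Int.ofStr? prev with
        | some v => some v
        | none => pvScanLine parts word i
      | none => pvScanLine parts word i
    else pvScanLine parts word i

def pvFindCount (revLines : List String) (word : String) : Int :=
  match revLines with
  | [] => 0
  | l :: rest =>
    let parts := PySem.Str.split₀ l
    match pvScanLine parts word (parts.length - 1) with
    | some v => v
    | none => pvFindCount rest word

def parse_test_counts_py_alt (test_output : String) : Int × Int :=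
  let revLines := (PySem.Str.splitlines test_output).reverse
  (pvFindCount revLines "passed", pvFindCount revLines "failed")

-- ===== PRECONDITION & SPEC =====
def Spec_parse_test_counts_py (test_output : String) (out : Int × Int) : Prop := out = parse_test_counts_py_alt test_output
instance (test_output : String) (out : Int × Int) : Decidable (Spec_parse_test_counts_py test_output out) := by unfold Spec_parse_test_counts_py; infer_instance

-- ===== CLAIM (what is proved, stated in full; the proofs are below) =====
def Claim_equal_parse_test_counts_py : Prop := ∀ (test_output : String), Dom_parse_test_counts_py test_output → Spec_parse_test_counts_py test_output (parse_test_counts_py test_output)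

-- ===== LEMMAS AND PROOFS =====

-- the "candidate count" contributed by token position ip of a line with tokens `parts`
def pvOpt (parts : List String) (word : String) (ip : Int × String) : Option Int :=
  if ip.2 = word ∧ 0 < ip.1 then (PySem.List.pyGet? parts (ip.1 - 1)).bind PySem.Int.ofStr? else none

def pvOpts (word : String) (line : String) : List (Option Int) :=
  (PySem.List.enumerate (PySem.Str.split₀ line)).map (pvOpt (PySem.Str.split₀ line) word)

-- A's per-token step updates the two components independently
lemma pvStep_eq (parts : List String) (pf : Int × Int) (ip : Int × String) :
    (let pf1 :=
      if ip.2 = "passed" ∧ 0 < ip.1 then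
        match PySem.List.pyGet? parts (ip.1 - 1) with
        | some prev =>
          match PySem.Int.ofStr? prev with
          | some v => (v, pf.2)
          | none => pf
        | none => pf
      else pf
     if ip.2 = "failed" ∧ 0 < ip.1 then
        match PySem.List.pyGet? parts (ip.1 - 1) with
        | some prev =>
          match PySem.Int.ofStr? prev with
          | some v => (pf1.1, v)
          | none => pf1
        | none => pf1
      else pf1) =
    ((pvOpt parts "passed" ip).getD pf.1, (pvOpt parts "failed" ip).getD pf.2) := by
  obtain ⟨i, p⟩ := ip
  by_cases hp : p = "passed" ∧ 0 < i <;> by_cases hf : p = "failed" ∧ 0 < i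
  · exact absurd (hp.1 ▸ hf.1) (by decide)
  all_goals
    simp only [pvOpt, hp, hf, if_neg, not_false_iff]
  all_goals
    cases hg : PySem.List.pyGet? parts (i - 1) with
    | none => simp
    | some prev => cases ho : PySem.Int.ofStr? prev <;> simp [ho]

-- the paired fold splits into two independent option-folds
lemma pvFold_pair (parts : List String) (l : List (Int × String)) (a b : Int) :
    l.foldl (fun pf ip =>
      let pf1 :=
        if ip.2 = "passed" ∧ 0 < ip.1 then
          match PySem.List.pyGet? parts (ip.1 - 1) with
          | some prev =>
            match PySem.Int.ofStr? prev with
            | some v => (v, pf.2)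
            | none => pf
          | none => pf
        else pf
      if ip.2 = "failed" ∧ 0 < ip.1 then
        match PySem.List.pyGet? parts (ip.1 - 1) with
        | some prev =>
          match PySem.Int.ofStr? prev with
          | some v => (pf1.1, v)
          | none => pf1
        | none => pf1
      else pf1) (a, b) =
    ((l.map (pvOpt parts "passed")).foldl (fun x o => o.getD x) a,
     (l.map (pvOpt parts "failed")).foldl (fun x o => o.getD x) b) := by
  induction l generalizing a b with
  | nil => rfl
  | cons ip t ih =>
    simp only [List.foldl_cons, List.map_cons]
    rw [pvStep_eq parts (a, b) ip]
    exact ih _ _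

-- generic: a "last write wins" fold is the first hit of the reversed option list
lemma pvFoldl_getD_eq (l : List (Option Int)) (init : Int) :
    l.foldl (fun x o => o.getD x) init = (l.reverse.findSome? id).getD init := by
  induction l generalizing init with
  | nil => rfl
  | cons o t ih =>
    simp only [List.foldl_cons, List.reverse_cons, List.findSome?_append, ih]
    cases h : t.reverse.findSome? id with
    | some v => simp [Option.or]
    | none => cases o <;> simp [Option.or, List.findSome?]

-- A's outer fold, one word at a time, equals the first hit over the fully reversed option stream
lemma pvAfold_eq (w : String) (lines : List String) (init : Int) :
    lines.foldl (fun x line => ((pvOpts w line).foldl (fun x o => o.getD x) x)) init =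
    ((lines.flatMap (pvOpts w)).reverse.findSome? id).getD init := by
  induction lines generalizing init with
  | nil => rfl
  | cons l t ih =>
    simp only [List.foldl_cons]
    rw [ih, pvFoldl_getD_eq]
    simp only [List.flatMap_cons, List.reverse_append, List.findSome?_append]
    cases h : (t.flatMap (pvOpts w)).reverse.findSome? id <;>
      cases h2 : ((pvOpts w l).reverse).findSome? id <;> simp [Option.or]

-- B's inner backward scan = first hit in the reversed prefix of the option list of the line
lemma pvScanLine_eq (parts : List String) (w : String) (i : Nat) (hi : i < parts.length) :
    pvScanLine parts w i =
      ((((PySem.List.enumerate parts).map (pvOpt parts w)).take (i + 1)).reverse).findSome? id := by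
  induction i with
  | zero =>
    have h0 : (((PySem.List.enumerate parts).map (pvOpt parts w)).take 1) = [pvOpt parts w (0, parts[0])] := by
      cases parts with
      | nil => simp at hi
      | cons x xs => simp [PySem.List.enumerate_cons]
    rw [h0]
    simp [pvScanLine, pvOpt, List.findSome?]
  | succ j ih =>
    have hj : j < parts.length := Nat.lt_of_succ_lt hi
    have hlen : j + 1 < ((PySem.List.enumerate parts).map (pvOpt parts w)).length := by
      simpa [PySem.List.length_enumerate] using hi
    rw [List.take_add_one, List.getElem?_eq_getElem hlen]
    simp only [List.reverse_append, Option.toList_some, List.reverse_cons, List.reverse_nil,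
      List.nil_append, List.cons_append, List.findSome?]
    have hget : ((PySem.List.enumerate parts).map (pvOpt parts w))[j + 1] =
        pvOpt parts w ((j : Int) + 1, parts[j + 1]) := by
      simp [List.getElem_map, PySem.List.getElem_enumerate]
    rw [hget]
    have hv : pvOpt parts w ((j : Int) + 1, parts[j + 1]) =
        if parts[j + 1] = w then (PySem.List.pyGet? parts ((j : Nat) : Int)).bind PySem.Int.ofStr? else none := by
      simp only [pvOpt]
      by_cases hw : parts[j + 1] = w
      · simp [hw, show (0:Int) < (j:Int) + 1 by positivity, show ((j:Int) + 1 - 1) = (j : Nat) by ring]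
      · simp [hw]
    rw [hv]
    have hg1 : PySem.List.pyGet? parts ((j : Int) + 1) = some parts[j + 1] := by
      have : ((j : Int) + 1) = ((j + 1 : Nat) : Int) := by push_cast; ring
      rw [this, PySem.List.pyGet?_natCast]
      exact List.getElem?_eq_getElem hi
    have hg0 : PySem.List.pyGet? parts ((j : Int)) = some parts[j] := by
      rw [PySem.List.pyGet?_natCast]
      exact List.getElem?_eq_getElem hj
    by_cases hw : parts[j + 1] = w
    · simp only [pvScanLine, hg1, hw, hg0, Option.bind_some, if_pos]
      cases PySem.Int.ofStr? parts[j] with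
      | some v => simp
      | none => simpa using ih hj
    · have hne : PySem.List.pyGet? parts ((j : Int) + 1) ≠ some w := by
        rw [hg1]; simpa using hw
      simp only [pvScanLine, if_neg hne, if_neg hw]
      simpa using ih hj

lemma pvScanLine_line (line : String) (w : String) :
    pvScanLine (PySem.Str.split₀ line) w ((PySem.Str.split₀ line).length - 1) =
      ((pvOpts w line).reverse).findSome? id := by
  cases hp : PySem.Str.split₀ line with
  | nil => simp [pvScanLine, pvOpts, hp, PySem.List.enumerate_nil]
  | cons x xs =>
    have hlt : (x :: xs).length - 1 < (x :: xs).length := by simp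
    have := pvScanLine_eq (x :: xs) w ((x :: xs).length - 1) hlt
    rw [this]
    have : ((PySem.List.enumerate (x :: xs)).map (pvOpt (x :: xs) w)).take ((x :: xs).length - 1 + 1) =
        (PySem.List.enumerate (x :: xs)).map (pvOpt (x :: xs) w) := by
      apply List.take_of_length_le
      simp [PySem.List.length_enumerate]
    rw [this]
    simp [pvOpts, hp]

-- B's line loop = first hit over the lines, each line contributing its reversed option list
lemma pvFindCount_eq (revLines : List String) (w : String) :
    pvFindCount revLines w =
      ((revLines.flatMap (fun l => (pvOpts w l).reverse)).findSome? id).getD 0 := by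
  induction revLines with
  | nil => rfl
  | cons l t ih =>
    simp only [pvFindCount, List.flatMap_cons, List.findSome?_append]
    rw [pvScanLine_line l w]
    cases h : ((pvOpts w l).reverse).findSome? id with
    | some v => simp [Option.or]
    | none => simp [Option.or, ih]

lemma pvB_word (lines : List String) (w : String) :
    pvFindCount lines.reverse w = ((lines.flatMap (pvOpts w)).reverse.findSome? id).getD 0 := by
  rw [pvFindCount_eq, List.reverse_flatMap]
  rfl

lemma pvOuter (lines : List String) (a b : Int) :
    lines.foldl (fun pf line =>
      let parts := PySem.Str.split₀ line
      (PySem.List.enumerate parts).foldl (fun pf ip =>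
        let pf1 :=
          if ip.2 = "passed" ∧ 0 < ip.1 then
            match PySem.List.pyGet? parts (ip.1 - 1) with
            | some prev =>
              match PySem.Int.ofStr? prev with
              | some v => (v, pf.2)
              | none => pf
            | none => pf
          else pf
        if ip.2 = "failed" ∧ 0 < ip.1 then
          match PySem.List.pyGet? parts (ip.1 - 1) with
          | some prev =>
            match PySem.Int.ofStr? prev with
            | some v => (pf1.1, v)
            | none => pf1
          | none => pf1
        else pf1) pf) (a, b) =
    (lines.foldl (fun x line => ((pvOpts "passed" line).foldl (fun x o => o.getD x) x)) a,
     lines.foldl (fun x line => ((pvOpts "failed" line).foldl (fun x o => o.getD x) x)) b) := by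
  induction lines generalizing a b with
  | nil => rfl
  | cons l t ih =>
    simp only [List.foldl_cons]
    rw [pvFold_pair (PySem.Str.split₀ l) (PySem.List.enumerate (PySem.Str.split₀ l)) a b]
    exact ih _ _

lemma pvA_eq (s : String) :
    parse_test_counts_py s =
      ((((PySem.Str.splitlines s).flatMap (pvOpts "passed")).reverse.findSome? id).getD 0,
       (((PySem.Str.splitlines s).flatMap (pvOpts "failed")).reverse.findSome? id).getD 0) := by
  unfold parse_test_counts_py
  rw [pvOuter, pvAfold_eq, pvAfold_eq]

-- ===== VERDICT (by name: the statement is the Claim_ definition above) =====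
theorem parse_test_counts_py_spec : Claim_equal_parse_test_counts_py := by
  intro s _
  unfold Spec_parse_test_counts_py parse_test_counts_py_alt
  rw [pvA_eq]
  show _ = (pvFindCount (PySem.Str.splitlines s).reverse "passed",
            pvFindCount (PySem.Str.splitlines s).reverse "failed")
  rw [pvB_word, pvB_word]
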